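-- pv_equiv track=rewrite | github.com/rwails/tempest | routing_changes/hornet/hornet.py | process_unmapped_intra_as_hops
-- ===== SOURCE A (Python) =====
-- BAD_RESOLVE = "*"
--
-- def process_unmapped_intra_as_hops(as_path):
--     if len(as_path) < 3:
--         return as_path
--     else:
--         slice = as_path[0:3]
--         if slice[0] == slice[2] and slice[1] == BAD_RESOLVE:
--             return process_unmapped_intra_as_hops([as_path[0]] + as_path[3:])
--         else:
--             return [as_path[0]] + process_unmapped_intra_as_hops(as_path[1:])
-- ===== SOURCE B (Python) =====
-- BAD_RESOLVE = "*"
--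
-- def process_unmapped_intra_as_hops(as_path):
--     # single pass with an index cursor and an accumulator; no slicing/copying
--     if not as_path:
--         return []
--     out = []
--     head = as_path[0]
--     i = 1
--     n = len(as_path)
--     while i + 1 < n:
--         if as_path[i] == BAD_RESOLVE and as_path[i + 1] == head:
--             i += 2
--         else:
--             out.append(head)
--             head = as_path[i]
--             i += 1
--     out.append(head)
--     out.extend(as_path[i:])
--     return out
-- ===== Notes on version B (the rewrite author's own statement) =====
-- stated objective: faster
-- what changed: Replaces A's recursion that rebuilds the list with slices and concatenations at every step by one iterative pass over the original list with an index cursor, a current head and an output accumulator.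
import Mathlib
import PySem

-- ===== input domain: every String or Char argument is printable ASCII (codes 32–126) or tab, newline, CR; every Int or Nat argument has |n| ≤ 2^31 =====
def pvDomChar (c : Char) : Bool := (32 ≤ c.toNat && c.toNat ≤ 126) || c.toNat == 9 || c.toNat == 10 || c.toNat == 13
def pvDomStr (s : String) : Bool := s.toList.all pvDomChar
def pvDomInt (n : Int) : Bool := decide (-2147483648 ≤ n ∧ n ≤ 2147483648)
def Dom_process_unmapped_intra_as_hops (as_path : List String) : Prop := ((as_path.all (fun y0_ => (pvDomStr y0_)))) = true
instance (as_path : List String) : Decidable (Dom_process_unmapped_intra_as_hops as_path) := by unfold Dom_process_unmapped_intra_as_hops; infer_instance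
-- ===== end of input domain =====

-- B replaces A's recursion with slicing/concatenation (O(n^2)) by one iterative pass
-- with an index cursor and an accumulator (O(n)); same return value everywhere.

-- ===== PORT A =====
-- literal port of A: recursion on the list, slices as pattern match / drop
def process_unmapped_intra_as_hops (as_path : List String) : List String :=
  match as_path with
  | a :: b :: c :: rest =>
      if a = c ∧ b = "*" then
        process_unmapped_intra_as_hops (a :: rest)
      else
        a :: process_unmapped_intra_as_hops (b :: c :: rest)
  | l => l
termination_by as_path.length
decreasing_by all_goals simp_all [List.length]

-- ===== PORT B =====
-- Source B's while loop: index i, current head, accumulator out (appended at the back)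
def pvAltGo (as_path : List String) (out : List String) (head : String) (i : Nat) : List String :=
  if i + 1 < as_path.length then
    if as_path.getD i "" = "*" ∧ as_path.getD (i + 1) "" = head then
      pvAltGo as_path out head (i + 2)
    else
      pvAltGo as_path (out ++ [head]) (as_path.getD i "") (i + 1)
  else
    (out ++ [head]) ++ as_path.drop i
termination_by as_path.length - i
decreasing_by all_goals omega

def process_unmapped_intra_as_hops_alt (as_path : List String) : List String :=
  match as_path with
  | [] => []
  | head :: _ => pvAltGo as_path [] head 1

-- ===== PRECONDITION & SPEC =====
def Spec_process_unmapped_intra_as_hops (as_path : List String) (out : List String) : Prop := out = process_unmapped_intra_as_hops_alt as_path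
instance (as_path : List String) (out : List String) : Decidable (Spec_process_unmapped_intra_as_hops as_path out) := by unfold Spec_process_unmapped_intra_as_hops; infer_instance

-- ===== CLAIM (what is proved, stated in full; the proofs are below) =====
def Claim_equal_process_unmapped_intra_as_hops : Prop := ∀ (as_path : List String), Dom_process_unmapped_intra_as_hops as_path → Spec_process_unmapped_intra_as_hops as_path (process_unmapped_intra_as_hops as_path)

-- ===== LEMMAS AND PROOFS =====

-- the loop computes: out ++ A (head :: as_path.drop i)
theorem pvAltGo_eq (as_path : List String) (out : List String) (head : String) (i : Nat) :
    pvAltGo as_path out head i = out ++ process_unmapped_intra_as_hops (head :: as_path.drop i) := by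
  rw [pvAltGo]
  split_ifs with hlt hcol
  · -- collapse step
    have hi : i < as_path.length := by omega
    rw [pvAltGo_eq as_path out head (i + 2)]
    rw [List.drop_eq_getElem_cons hi, List.drop_eq_getElem_cons hlt]
    conv_rhs => rw [process_unmapped_intra_as_hops]
    rw [List.getD_eq_getElem _ _ hi, List.getD_eq_getElem _ _ hlt] at hcol
    rw [if_pos ⟨hcol.2.symm, hcol.1⟩]
  · -- emit step
    have hi : i < as_path.length := by omega
    rw [pvAltGo_eq as_path (out ++ [head]) (as_path.getD i "") (i + 1)]
    rw [List.drop_eq_getElem_cons hi, List.drop_eq_getElem_cons hlt]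
    conv_rhs => rw [process_unmapped_intra_as_hops]
    rw [List.getD_eq_getElem _ _ hi, List.getD_eq_getElem _ _ hlt] at hcol
    have hcol' : ¬ (head = as_path[i + 1] ∧ as_path[i] = "*") := by
      intro ⟨h1, h2⟩; exact hcol ⟨h2, h1.symm⟩
    rw [if_neg hcol', List.getD_eq_getElem _ _ hi]
    simp [← List.drop_eq_getElem_cons hlt]
  · -- tail of length ≤ 1 remains
    have hlen : (as_path.drop i).length ≤ 1 := by
      have := as_path.length_drop (i := i); omega
    match hd : as_path.drop i with
    | [] => simp [process_unmapped_intra_as_hops]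
    | [x] => simp [process_unmapped_intra_as_hops]
    | x :: y :: t => rw [hd] at hlen; simp at hlen
termination_by as_path.length - i

-- ===== VERDICT (by name: the statement is the Claim_ definition above) =====
theorem process_unmapped_intra_as_hops_spec : Claim_equal_process_unmapped_intra_as_hops := by
  intro as_path _
  unfold Spec_process_unmapped_intra_as_hops
  cases as_path with
  | nil =>
      show process_unmapped_intra_as_hops [] = []
      rw [process_unmapped_intra_as_hops]
      intro a b c rest h
      exact absurd h (by simp)
  | cons head t =>
      show process_unmapped_intra_as_hops (head :: t) = pvAltGo (head :: t) [] head 1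
      rw [pvAltGo_eq, List.drop_succ_cons, List.drop_zero, List.nil_append]
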